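-- pv_equiv track=rewrite | github.com/fenghaitao/simics-7-packages-2025-38-linux64 | simics-7.57.0/linux64/lib/python-py3/simmod/code_coverage/filter_mappings.py | find_entries_to_remove
-- ===== SOURCE A (Python) =====
-- def find_entries_to_remove(to_remove_per_map, remove):
--     if not to_remove_per_map:
--         return []
--     if remove:
--         combined = set()
--         for to_remove in to_remove_per_map:
--             combined |= set(to_remove)
--         return sorted(combined)
--
--     # Must be in all mappings in order to remove
--     if len(to_remove_per_map) == 1:
--         return to_remove_per_map[0]
--
--     to_remove = []
--     for i in to_remove_per_map[0]:
--         in_all = True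
--         for mapping in to_remove_per_map[1:]:
--             if i not in mapping:
--                 in_all = False
--         if in_all:
--             to_remove.append(i)
--     return to_remove
-- ===== SOURCE B (Python) =====
-- def find_entries_to_remove(to_remove_per_map, remove):
--     if not to_remove_per_map:
--         return []
--     if remove:
--         # sort the flattened multiset, then squeeze out adjacent duplicates
--         flat = sorted(x for lst in to_remove_per_map for x in lst)
--         out = []
--         for x in flat:
--             if not out or out[-1] != x:
--                 out.append(x)
--         return out
--     first, rest = to_remove_per_map[0], to_remove_per_map[1:]
--     if not rest:
--         return list(first)
--     # precompute the set of elements common to all OTHER mappings, then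
--     # keep first's elements (order and duplicates preserved) that are in it
--     allowed = set(rest[0])
--     for m in rest[1:]:
--         allowed.intersection_update(m)
--     return [x for x in first if x in allowed]
-- ===== Notes on version B (the rewrite author's own statement) =====
-- stated objective: alternative
-- what changed: Union branch sorts the flattened list and removes adjacent duplicates in one scan instead of folding set unions then sorting; intersection branch precomputes one hash-set intersection of the other mappings and then filters the first list once, instead of scanning every other mapping list per element.
import Mathlib
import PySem

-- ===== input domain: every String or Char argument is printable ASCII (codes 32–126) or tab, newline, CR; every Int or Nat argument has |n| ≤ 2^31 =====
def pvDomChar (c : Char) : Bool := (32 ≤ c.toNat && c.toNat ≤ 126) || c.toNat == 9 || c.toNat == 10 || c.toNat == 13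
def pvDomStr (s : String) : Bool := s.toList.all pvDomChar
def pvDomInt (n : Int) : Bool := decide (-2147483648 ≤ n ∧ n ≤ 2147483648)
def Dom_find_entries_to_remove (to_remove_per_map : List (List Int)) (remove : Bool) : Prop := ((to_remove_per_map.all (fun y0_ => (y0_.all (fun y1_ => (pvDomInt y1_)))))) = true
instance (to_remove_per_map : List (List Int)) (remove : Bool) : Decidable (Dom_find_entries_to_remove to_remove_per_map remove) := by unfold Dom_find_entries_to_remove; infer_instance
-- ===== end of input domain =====

-- B replaces A's set-union fold + sort by sort-then-adjacent-dedup, and A's per-element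
-- scans over all other mapping lists by one precomputed hash-set intersection followed by
-- a single filter of the first list (a different algorithm, not claimed faster).

-- ===== PORT A =====
def find_entries_to_remove (to_remove_per_map : List (List Int)) (remove : Bool) : List Int :=
  if to_remove_per_map = [] then []
  else if remove then
    let combined := to_remove_per_map.foldl
      (fun s t => PySem.Set.union s (PySem.Set.ofList t)) PySem.Set.empty
    PySem.List.sorted combined (fun x => x) false
  else if to_remove_per_map.length = 1 then to_remove_per_map.headI
  else
    to_remove_per_map.headI.foldl (fun acc i =>
      let in_all := to_remove_per_map.tail.foldl
        (fun b m => if ¬ m.contains i then false else b) true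
      if in_all then acc ++ [i] else acc) []

-- ===== PORT B =====
def find_entries_to_remove_alt (to_remove_per_map : List (List Int)) (remove : Bool) : List Int :=
  match to_remove_per_map with
  | [] => []
  | first :: rest =>
    if remove then
      let flat := PySem.List.sorted ((first :: rest).flatMap (fun l => l)) (fun x => x) false
      flat.foldl (fun out x =>
        if out = [] ∨ out.getLast? ≠ some x then out ++ [x] else out) []
    else
      match rest with
      | [] => first
      | r0 :: rs =>
        let allowed := rs.foldl (fun s m => PySem.Set.inter s m) (PySem.Set.ofList r0)
        first.filter (fun x => allowed.contains x)

-- ===== PRECONDITION & SPEC =====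
def Spec_find_entries_to_remove (to_remove_per_map : List (List Int)) (remove : Bool) (out : List Int) : Prop := out = find_entries_to_remove_alt to_remove_per_map remove
instance (to_remove_per_map : List (List Int)) (remove : Bool) (out : List Int) : Decidable (Spec_find_entries_to_remove to_remove_per_map remove out) := by unfold Spec_find_entries_to_remove; infer_instance

-- ===== CLAIM (what is proved, stated in full; the proofs are below) =====
def Claim_equal_find_entries_to_remove : Prop := ∀ (to_remove_per_map : List (List Int)) (remove : Bool), Dom_find_entries_to_remove to_remove_per_map remove → Spec_find_entries_to_remove to_remove_per_map remove (find_entries_to_remove to_remove_per_map remove)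

-- ===== LEMMAS AND PROOFS =====

-- A's union fold: nodup and same members as the flattened input.
theorem unionFold_nodup (xs : List (List Int)) (s : PySem.Set Int) (hs : s.Nodup) :
    (xs.foldl (fun s t => PySem.Set.union s (PySem.Set.ofList t)) s).Nodup := by
  induction xs generalizing s with
  | nil => exact hs
  | cons l ls ih => exact ih _ (PySem.Set.nodup_union _ _ hs)

theorem unionFold_mem (xs : List (List Int)) (s : PySem.Set Int) (x : Int) :
    x ∈ xs.foldl (fun s t => PySem.Set.union s (PySem.Set.ofList t)) s ↔
      x ∈ s ∨ x ∈ xs.flatMap (fun l => l) := by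
  induction xs generalizing s with
  | nil => simp
  | cons l ls ih =>
    simp [List.foldl_cons, ih, PySem.Set.mem_union, PySem.Set.mem_ofList]
    tauto

-- On a ≤-sorted list every member is ≤ the last element.
theorem pairwise_mem_le_getLast? : ∀ (l : List Int), l.Pairwise (· ≤ ·) → ∀ a ∈ l,
    ∃ g, l.getLast? = some g ∧ a ≤ g := by
  intro l
  induction l with
  | nil => intro _ a ha; simp at ha
  | cons x xs ih =>
    intro hl a ha
    cases xs with
    | nil => simp at ha; subst ha; exact ⟨a, rfl, le_refl a⟩
    | cons y ys =>
      have hx : ∀ b ∈ y :: ys, x ≤ b := (List.pairwise_cons.mp hl).1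
      have hxs : (y :: ys).Pairwise (· ≤ ·) := (List.pairwise_cons.mp hl).2
      rcases List.mem_cons.mp ha with h | h
      · subst h
        obtain ⟨g, hg, _⟩ := ih hxs y (by simp)
        exact ⟨g, by rw [List.getLast?_cons_cons]; exact hg,
          hx g (List.mem_of_getLast? hg)⟩
      · obtain ⟨g, hg, hag⟩ := ih hxs a h
        exact ⟨g, by rw [List.getLast?_cons_cons]; exact hg, hag⟩

-- B's adjacent-dedup fold on a ≤-sorted list yields a strictly increasing list
-- with the same members (plus the accumulator's).
theorem dedupFold_spec (l : List Int) : ∀ (acc : List Int),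
    l.Pairwise (· ≤ ·) → acc.Pairwise (· < ·) →
    (∀ a ∈ acc, ∀ x ∈ l, a ≤ x) →
    ((l.foldl (fun out x =>
        if out = [] ∨ out.getLast? ≠ some x then out ++ [x] else out) acc).Pairwise (· < ·) ∧
      ∀ y, y ∈ l.foldl (fun out x =>
        if out = [] ∨ out.getLast? ≠ some x then out ++ [x] else out) acc ↔ y ∈ acc ∨ y ∈ l) := by
  induction l with
  | nil => intro acc _ hacc _; exact ⟨hacc, fun y => by simp⟩
  | cons x xs ih =>
    intro acc hl hacc hle
    have hx : ∀ b ∈ xs, x ≤ b := (List.pairwise_cons.mp hl).1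
    have hxs : xs.Pairwise (· ≤ ·) := (List.pairwise_cons.mp hl).2
    simp only [List.foldl_cons]
    by_cases hc : acc = [] ∨ acc.getLast? ≠ some x
    · rw [if_pos hc]
      have haccx : ∀ a ∈ acc, a < x := by
        intro a ha
        rcases lt_or_eq_of_le (hle a ha x (by simp)) with h | h
        · exact h
        · exfalso
          subst h
          obtain ⟨g, hg, hag⟩ :=
            pairwise_mem_le_getLast? acc (hacc.imp (fun h => le_of_lt h)) a ha
          have hga : g ≤ a := hle g (List.mem_of_getLast? hg) a (by simp)
          have : acc.getLast? = some a := by rw [hg, le_antisymm hga hag]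
          rcases hc with hc | hc
          · simp [hc] at hg
          · exact hc this
      have hacc' : (acc ++ [x]).Pairwise (· < ·) := by
        rw [List.pairwise_append]
        exact ⟨hacc, List.pairwise_singleton _ _, fun a ha b hb => by
          simp at hb; subst hb; exact haccx a ha⟩
      have hle' : ∀ a ∈ acc ++ [x], ∀ b ∈ xs, a ≤ b := by
        intro a ha b hb
        rcases List.mem_append.mp ha with h | h
        · exact hle a h b (by simp [hb])
        · simp at h; subst h; exact hx b hb
      obtain ⟨hp, hm⟩ := ih (acc ++ [x]) hxs hacc' hle'
      refine ⟨hp, fun y => ?_⟩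
      rw [hm y]
      simp
      tauto
    · rw [if_neg hc]
      push_neg at hc
      have hxin : x ∈ acc := by
        have := List.mem_of_getLast? hc.2
        exact this
      have hle' : ∀ a ∈ acc, ∀ b ∈ xs, a ≤ b := fun a ha b hb => hle a ha b (by simp [hb])
      obtain ⟨hp, hm⟩ := ih acc hxs hacc hle'
      refine ⟨hp, fun y => ?_⟩
      rw [hm y]
      simp
      constructor
      · tauto
      · rintro (h | h | h)
        · exact Or.inl h
        · subst h; exact Or.inl hxin
        · exact Or.inr h

-- B's set-intersection fold: membership is membership in every list.
theorem interFold_mem (ms : List (List Int)) (s : PySem.Set Int) (x : Int) :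
    x ∈ ms.foldl (fun s m => PySem.Set.inter s m) s ↔ x ∈ s ∧ ∀ m ∈ ms, x ∈ m := by
  induction ms generalizing s with
  | nil => simp
  | cons m ms ih =>
    simp [List.foldl_cons, ih, PySem.Set.mem_inter]
    tauto

-- Inner fold of A's intersection branch is List.all.
theorem innerFold_eq_all (ms : List (List Int)) (i : Int) (b : Bool) :
    ms.foldl (fun b m => if ¬ m.contains i then false else b) b =
      (b && ms.all (fun m => m.contains i)) := by
  induction ms generalizing b with
  | nil => simp
  | cons m ms ih =>
    simp only [List.foldl_cons, List.all_cons, ih]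
    by_cases h : m.contains i = true <;>
      simp [Bool.and_comm, Bool.and_assoc]

-- A's intersection loop appends exactly the first list's elements present in every other mapping.
theorem outerFold_eq_filter (rest : List (List Int)) (first acc : List Int) :
    first.foldl (fun acc i =>
      if rest.foldl (fun b m => if ¬ m.contains i then false else b) true
      then acc ++ [i] else acc) acc =
      acc ++ first.filter (fun x => rest.all (fun m => m.contains x)) := by
  have hf : (fun (acc : List Int) (i : Int) =>
      if rest.foldl (fun b m => if ¬ m.contains i then false else b) true
      then acc ++ [i] else acc) =
      (fun acc i => if (rest.all fun m => m.contains i) then acc ++ [i] else acc) := by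
    funext acc i
    rw [innerFold_eq_all]
    simp
  rw [hf, PySem.List.foldl_append_if_eq_filter]

-- ===== VERDICT (by name: the statement is the Claim_ definition above) =====
theorem find_entries_to_remove_spec : Claim_equal_find_entries_to_remove := by
  intro xs remove _
  unfold Spec_find_entries_to_remove find_entries_to_remove find_entries_to_remove_alt
  cases xs with
  | nil => simp
  | cons first rest =>
    simp only [reduceCtorEq, if_false]
    cases remove with
    | true =>
      simp only [if_true]
      have hsp : (PySem.List.sorted ((first :: rest).flatMap (fun l => l)) (fun x => x) false).Pairwise
          ((· ≤ ·) : Int → Int → Prop) := by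
        simpa using PySem.List.sorted_pairwise ((first :: rest).flatMap (fun l => l)) (fun x => x)
      obtain ⟨hp, hm⟩ := dedupFold_spec
        (PySem.List.sorted ((first :: rest).flatMap (fun l => l)) (fun x => x) false) []
        hsp (List.Pairwise.nil) (by simp)
      apply PySem.List.sorted_eq_of_perm_of_pairwise_lt
      · refine (List.perm_ext_iff_of_nodup
          (List.Pairwise.imp (fun h => ne_of_lt h) hp)
          (unionFold_nodup _ _ List.nodup_nil)).mpr ?_
        intro y
        rw [hm y, unionFold_mem]
        simp [PySem.List.mem_sorted]
      · exact hp
    | false =>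
      simp only [Bool.false_eq_true, if_false]
      cases rest with
      | nil => simp
      | cons r0 rs =>
        have hlen : (first :: r0 :: rs).length ≠ 1 := by simp
        rw [if_neg hlen]
        simp only [List.headI, List.tail]
        refine (outerFold_eq_filter (r0 :: rs) first []).trans ?_
        simp only [List.nil_append]
        apply List.filter_congr
        intro x _
        have h := interFold_mem rs (PySem.Set.ofList r0) x
        rw [Bool.eq_iff_iff, List.all_eq_true, PySem.Set.contains_iff, h,
          PySem.Set.mem_ofList]
        simp only [List.mem_cons, forall_eq_or_imp, List.contains_iff_mem]
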